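-- pv_equiv track=rewrite | github.com/finicu212/kcd2-rigged-dice-sim | kcd2.py | generate_rigged_combinations
-- ===== SOURCE A (Python) =====
-- from typing import List, Dict, Tuple
--
-- N = 6 # dice per lineup
--
-- def generate_rigged_combinations(inventory: Dict[str,int], max_count: int = N) -> List[List[str]]:
--     items = list(inventory.items())
--     combos = []
--     def helper(i, cur, remaining):
--         if i == len(items):
--             combos.append(list(cur))
--             return
--         die, avail = items[i]
--         for take in range(min(avail, remaining) + 1):
--             cur.extend([die]*take)
--             helper(i+1, cur, remaining - take)
--             for _ in range(take):
--                 cur.pop()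
--     helper(0, [], max_count)
--     return combos
-- ===== SOURCE B (Python) =====
-- from typing import List, Dict
--
-- N = 6
--
-- def generate_rigged_combinations(inventory: Dict[str, int], max_count: int = N) -> List[List[str]]:
--     # Iterative level-by-level expansion of a frontier of partial lineups
--     # (no recursion, no shared mutable current list / backtracking).
--     partials = [([], 0)]  # (combo so far, dice used so far)
--     for die, avail in inventory.items():
--         nxt = []
--         for combo, used in partials:
--             for take in range(min(avail, max_count - used) + 1):
--                 nxt.append((combo + [die] * take, used + take))
--         partials = nxt
--     return [combo for combo, _ in partials]
-- ===== Notes on version B (the rewrite author's own statement) =====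
-- stated objective: alternative
-- what changed: Replaced the recursive backtracking DFS over a shared mutable current list with an iterative level-by-level expansion of a frontier of partial lineups (one loop over inventory items, extending every partial by each admissible take count).
import Mathlib
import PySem

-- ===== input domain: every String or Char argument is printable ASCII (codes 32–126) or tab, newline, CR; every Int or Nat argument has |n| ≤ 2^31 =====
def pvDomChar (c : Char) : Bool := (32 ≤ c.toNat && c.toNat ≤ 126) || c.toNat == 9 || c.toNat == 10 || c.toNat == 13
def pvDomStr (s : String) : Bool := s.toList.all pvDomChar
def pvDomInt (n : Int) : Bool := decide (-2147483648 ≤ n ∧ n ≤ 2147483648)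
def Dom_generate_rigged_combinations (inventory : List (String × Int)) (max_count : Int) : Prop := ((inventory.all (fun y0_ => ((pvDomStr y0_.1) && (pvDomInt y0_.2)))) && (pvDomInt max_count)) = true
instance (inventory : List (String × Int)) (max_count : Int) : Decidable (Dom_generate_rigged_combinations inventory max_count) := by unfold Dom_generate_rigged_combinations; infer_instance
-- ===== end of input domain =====

-- B replaces A's backtracking DFS over a shared mutable list by an iterative
-- level-by-level expansion of a frontier of partial lineups (objective: alternative).

-- ===== PORT A =====
-- helper(i, cur, remaining): ported by recursion on the suffix of items still to process;
-- the inner for-loop over take is a foldl over range(min(avail, remaining) + 1) threading combos.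
def pvHelperA : List (String × Int) → List String → Int → List (List String) → List (List String)
  | [], cur, _remaining, combos => combos ++ [cur]
  | (die, avail) :: rest, cur, remaining, combos =>
      (PySem.List.pyRange 0 (min avail remaining + 1) 1).foldl
        (fun acc take => pvHelperA rest (cur ++ List.replicate take.toNat die) (remaining - take) acc)
        combos

def generate_rigged_combinations (inventory : List (String × Int)) (max_count : Int) : List (List String) :=
  pvHelperA inventory [] max_count []

-- ===== PORT B =====
def generate_rigged_combinations_alt (inventory : List (String × Int)) (max_count : Int) : List (List String) :=
  (inventory.foldl
    (fun partials p =>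
      partials.foldl
        (fun nxt cu =>
          (PySem.List.pyRange 0 (min p.2 (max_count - cu.2) + 1) 1).foldl
            (fun nxt2 take => nxt2 ++ [(cu.1 ++ List.replicate take.toNat p.1, cu.2 + take)])
            nxt)
        [])
    [(([] : List String), (0 : Int))]).map Prod.fst

-- ===== PRECONDITION & SPEC =====
def Spec_generate_rigged_combinations (inventory : List (String × Int)) (max_count : Int) (out : List (List String)) : Prop := out = generate_rigged_combinations_alt inventory max_count
instance (inventory : List (String × Int)) (max_count : Int) (out : List (List String)) : Decidable (Spec_generate_rigged_combinations inventory max_count out) := by unfold Spec_generate_rigged_combinations; infer_instance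

-- ===== CLAIM (what is proved, stated in full; the proofs are below) =====
def Claim_equal_generate_rigged_combinations : Prop := ∀ (inventory : List (String × Int)) (max_count : Int), Dom_generate_rigged_combinations inventory max_count → Spec_generate_rigged_combinations inventory max_count (generate_rigged_combinations inventory max_count)

-- ===== LEMMAS AND PROOFS =====

-- B's fold over the remaining items, abstracted over the current frontier.
def pvBFold (mc : Int) (items : List (String × Int)) (partials : List (List String × Int)) : List (List String × Int) :=
  items.foldl
    (fun partials p =>
      partials.foldl
        (fun nxt cu =>
          (PySem.List.pyRange 0 (min p.2 (mc - cu.2) + 1) 1).foldl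
            (fun nxt2 take => nxt2 ++ [(cu.1 ++ List.replicate take.toNat p.1, cu.2 + take)])
            nxt)
        [])
    partials

theorem pvBFold_alt (inventory : List (String × Int)) (max_count : Int) :
    generate_rigged_combinations_alt inventory max_count
      = (pvBFold max_count inventory [([], 0)]).map Prod.fst := rfl

-- per-partial expansion of one inventory item
def pvExpand (mc : Int) (p : String × Int) (cu : List String × Int) : List (List String × Int) :=
  (PySem.List.pyRange 0 (min p.2 (mc - cu.2) + 1) 1).map
    (fun take => (cu.1 ++ List.replicate take.toNat p.1, cu.2 + take))

theorem pvStep_eq_flatMap (mc : Int) (p : String × Int) (partials : List (List String × Int)) :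
    partials.foldl
        (fun nxt cu =>
          (PySem.List.pyRange 0 (min p.2 (mc - cu.2) + 1) 1).foldl
            (fun nxt2 take => nxt2 ++ [(cu.1 ++ List.replicate take.toNat p.1, cu.2 + take)])
            nxt)
        []
      = partials.flatMap (pvExpand mc p) := by
  have h : ∀ (l : List (List String × Int)) (init : List (List String × Int)),
      l.foldl
        (fun nxt cu =>
          (PySem.List.pyRange 0 (min p.2 (mc - cu.2) + 1) 1).foldl
            (fun nxt2 take => nxt2 ++ [(cu.1 ++ List.replicate take.toNat p.1, cu.2 + take)])
            nxt)
        init = init ++ l.flatMap (pvExpand mc p) := by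
    intro l
    induction l with
    | nil => intro init; simp
    | cons cu rest ih =>
        intro init
        rw [List.foldl_cons, PySem.List.foldl_append_singleton_eq_map, ih, List.flatMap_cons,
          List.append_assoc]
        rfl
  simpa using h partials []

theorem pvBFold_cons (mc : Int) (p : String × Int) (rest : List (String × Int))
    (partials : List (List String × Int)) :
    pvBFold mc (p :: rest) partials = pvBFold mc rest (partials.flatMap (pvExpand mc p)) := by
  simp only [pvBFold, List.foldl_cons]
  rw [pvStep_eq_flatMap]

theorem pvBFold_append (mc : Int) (items : List (String × Int)) :
    ∀ (l1 l2 : List (List String × Int)),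
      pvBFold mc items (l1 ++ l2) = pvBFold mc items l1 ++ pvBFold mc items l2 := by
  induction items with
  | nil => intro l1 l2; simp [pvBFold]
  | cons p rest ih =>
      intro l1 l2
      rw [pvBFold_cons, pvBFold_cons, pvBFold_cons, List.flatMap_append, ih]

theorem pvBFold_nil_frontier (mc : Int) (items : List (String × Int)) :
    pvBFold mc items [] = [] := by
  induction items with
  | nil => rfl
  | cons p rest ih => rw [pvBFold_cons]; simpa using ih

-- main invariant: A's helper on the suffix `items` with current lineup `cur` and
-- budget `mc - used` appends exactly B's frontier expansion of the partial (cur, used).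
theorem pvMain (mc : Int) :
    ∀ (items : List (String × Int)) (cur : List String) (used : Int)
      (combos : List (List String)),
      pvHelperA items cur (mc - used) combos
        = combos ++ (pvBFold mc items [(cur, used)]).map Prod.fst := by
  intro items
  induction items with
  | nil => intro cur used combos; simp [pvHelperA, pvBFold]
  | cons p rest ih =>
      intro cur used combos
      obtain ⟨die, avail⟩ := p
      rw [pvBFold_cons]
      simp only [List.flatMap_cons, List.flatMap_nil, List.append_nil]
      have hrange : pvExpand mc (die, avail) (cur, used)
          = (PySem.List.pyRange 0 (min avail (mc - used) + 1) 1).map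
              (fun take => (cur ++ List.replicate take.toNat die, used + take)) := rfl
      rw [hrange]
      simp only [pvHelperA]
      -- generalize over the list of takes
      generalize PySem.List.pyRange 0 (min avail (mc - used) + 1) 1 = ts
      induction ts generalizing combos with
      | nil => simp [pvBFold_nil_frontier]
      | cons t ts' ihts =>
          simp only [List.foldl_cons, List.map_cons]
          rw [ihts]
          have h1 : mc - used - t = mc - (used + t) := by ring
          rw [h1, ih (cur ++ List.replicate t.toNat die) (used + t) combos]
          have h2 : ((cur ++ List.replicate t.toNat die, used + t) ::
              List.map (fun take => (cur ++ List.replicate take.toNat die, used + take)) ts')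
              = [(cur ++ List.replicate t.toNat die, used + t)] ++
                List.map (fun take => (cur ++ List.replicate take.toNat die, used + take)) ts' := rfl
          rw [h2, pvBFold_append, List.map_append, List.append_assoc]

-- ===== VERDICT (by name: the statement is the Claim_ definition above) =====
theorem generate_rigged_combinations_spec : Claim_equal_generate_rigged_combinations := by
  intro inventory max_count _
  show generate_rigged_combinations inventory max_count
      = generate_rigged_combinations_alt inventory max_count
  rw [pvBFold_alt]
  have h := pvMain max_count inventory [] 0 []
  simpa [generate_rigged_combinations] using h
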